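-- pv_equiv track=rewrite | github.com/Sean-Borneman/HexRay | backend/automatedhacking/findvulnerabilities.py | _build_heuristic_payloads
-- ===== SOURCE A (Python) =====
-- from typing import Dict, List, Optional
--
-- def _build_heuristic_payloads(findings: List[Dict[str, str]]) -> List[Dict[str, str]]:
--     payloads: List[Dict[str, str]] = []
--     funcs = {f.get('function') for f in findings if f.get('type') == 'dangerous_function'}
--     if {'gets', 'strcpy', 'strcat', 'scanf'} & funcs:
--         payloads.append({
--             'type': 'overflow_candidate_stdin',
--             'channel': 'stdin',
--             'data': 'A' * 512,
--             'note': 'Try to trigger overflow via unbounded input.'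
--         })
--     if {'sprintf', 'vsprintf'} & funcs:
--         payloads.append({
--             'type': 'format_string_candidate',
--             'channel': 'stdin',
--             'data': '%x.' * 20,
--             'note': 'Probe for format string vulnerability.'
--         })
--     if {'system', 'popen'} & funcs:
--         payloads.append({
--             'type': 'cmd_injection_probe',
--             'channel': 'stdin',
--             'data': '"; echo injected; #',
--             'note': 'Probe for command injection if user input reaches shell.'
--         })
--     payloads.append({
--         'type': 'baseline_run',
--         'channel': 'none',
--         'data': '',
--         'note': 'Baseline execution without special input.'
--     })
--     return payloads
-- ===== SOURCE B (Python) =====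
-- from typing import Dict, List
--
-- _RULES = [
--     (('gets', 'strcpy', 'strcat', 'scanf'), {
--         'type': 'overflow_candidate_stdin',
--         'channel': 'stdin',
--         'data': 'A' * 512,
--         'note': 'Try to trigger overflow via unbounded input.'
--     }),
--     (('sprintf', 'vsprintf'), {
--         'type': 'format_string_candidate',
--         'channel': 'stdin',
--         'data': '%x.' * 20,
--         'note': 'Probe for format string vulnerability.'
--     }),
--     (('system', 'popen'), {
--         'type': 'cmd_injection_probe',
--         'channel': 'stdin',
--         'data': '"; echo injected; #',
--         'note': 'Probe for command injection if user input reaches shell.'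
--     }),
-- ]
--
--
-- def _build_heuristic_payloads(findings: List[Dict[str, str]]) -> List[Dict[str, str]]:
--     payloads: List[Dict[str, str]] = []
--     for names, payload in _RULES:
--         if any(f.get('type') == 'dangerous_function' and f.get('function') in names
--                for f in findings):
--             payloads.append(dict(payload))
--     payloads.append({
--         'type': 'baseline_run',
--         'channel': 'none',
--         'data': '',
--         'note': 'Baseline execution without special input.'
--     })
--     return payloads
-- ===== Notes on version B (the rewrite author's own statement) =====
-- stated objective: alternative
-- what changed: B replaces A's set comprehension plus three hard-coded set-intersection if-branches by a data-driven rules table: for each (trigger-names, payload) rule it does one any-scan over the findings, never building the intermediate funcs set.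
import Mathlib
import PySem

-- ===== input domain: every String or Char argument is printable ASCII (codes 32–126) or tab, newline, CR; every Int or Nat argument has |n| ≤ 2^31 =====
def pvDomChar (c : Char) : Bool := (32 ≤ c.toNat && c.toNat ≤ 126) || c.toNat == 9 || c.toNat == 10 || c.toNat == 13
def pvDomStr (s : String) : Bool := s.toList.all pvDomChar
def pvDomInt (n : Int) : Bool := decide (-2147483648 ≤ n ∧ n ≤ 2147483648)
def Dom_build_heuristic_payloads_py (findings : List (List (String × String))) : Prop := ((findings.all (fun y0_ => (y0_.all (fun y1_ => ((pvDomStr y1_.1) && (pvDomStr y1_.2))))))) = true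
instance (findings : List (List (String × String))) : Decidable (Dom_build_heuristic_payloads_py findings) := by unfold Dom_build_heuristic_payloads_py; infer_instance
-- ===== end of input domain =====

-- B replaces A's three hard-coded set-intersection if-branches by a rules table scanned with a
-- single per-rule `any` over the findings (no intermediate set is built); objective: alternative.

-- shared payload literals (the same dict literals appear in both Python sources)
def pvPayloadOverflow : List (String × String) :=
  [("type", "overflow_candidate_stdin"), ("channel", "stdin"),
   ("data", String.ofList (List.replicate 512 'A')),
   ("note", "Try to trigger overflow via unbounded input.")]
def pvPayloadFormat : List (String × String) :=
  [("type", "format_string_candidate"), ("channel", "stdin"),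
   ("data", String.ofList ((List.replicate 20 ['%', 'x', '.']).flatten)),
   ("note", "Probe for format string vulnerability.")]
def pvPayloadCmd : List (String × String) :=
  [("type", "cmd_injection_probe"), ("channel", "stdin"),
   ("data", "\"; echo injected; #"),
   ("note", "Probe for command injection if user input reaches shell.")]
def pvPayloadBaseline : List (String × String) :=
  [("type", "baseline_run"), ("channel", "none"), ("data", ""),
   ("note", "Baseline execution without special input.")]

-- f.get(k) on a Python dict (association list, first match)
def pvGet (f : List (String × String)) (k : String) : Option String := (PySem.Dict.mk f).get? k

-- ===== PORT A =====
-- funcs = {f.get('function') for f in findings if f.get('type') == 'dangerous_function'}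
def pvFuncs (findings : List (List (String × String))) : PySem.Set (Option String) :=
  PySem.Set.ofList
    ((findings.filter (fun f => pvGet f "type" == some "dangerous_function")).map
      (fun f => pvGet f "function"))

def build_heuristic_payloads_py (findings : List (List (String × String))) : List (List (String × String)) :=
  let funcs := pvFuncs findings
  let payloads : List (List (String × String)) := []
  -- if {'gets','strcpy','strcat','scanf'} & funcs:   (truthiness = nonempty intersection)
  let payloads := if !(PySem.Set.inter (PySem.Set.ofList (["gets", "strcpy", "strcat", "scanf"].map some)) funcs).isEmpty
    then payloads ++ [pvPayloadOverflow] else payloads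
  -- if {'sprintf','vsprintf'} & funcs:
  let payloads := if !(PySem.Set.inter (PySem.Set.ofList (["sprintf", "vsprintf"].map some)) funcs).isEmpty
    then payloads ++ [pvPayloadFormat] else payloads
  -- if {'system','popen'} & funcs:
  let payloads := if !(PySem.Set.inter (PySem.Set.ofList (["system", "popen"].map some)) funcs).isEmpty
    then payloads ++ [pvPayloadCmd] else payloads
  payloads ++ [pvPayloadBaseline]

-- ===== PORT B =====
def pvRules : List (List String × List (String × String)) :=
  [(["gets", "strcpy", "strcat", "scanf"], pvPayloadOverflow),
   (["sprintf", "vsprintf"], pvPayloadFormat),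
   (["system", "popen"], pvPayloadCmd)]

-- any(f.get('type') == 'dangerous_function' and f.get('function') in names for f in findings)
def pvRuleFires (names : List String) (findings : List (List (String × String))) : Bool :=
  findings.any (fun f =>
    (pvGet f "type" == some "dangerous_function") && (names.map some).contains (pvGet f "function"))

def build_heuristic_payloads_py_alt (findings : List (List (String × String))) : List (List (String × String)) :=
  (pvRules.foldl (fun acc r => if pvRuleFires r.1 findings then acc ++ [r.2] else acc)
    ([] : List (List (String × String)))) ++ [pvPayloadBaseline]

-- ===== PRECONDITION & SPEC =====
def Spec_build_heuristic_payloads_py (findings : List (List (String × String))) (out : List (List (String × String))) : Prop := out = build_heuristic_payloads_py_alt findings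
instance (findings : List (List (String × String))) (out : List (List (String × String))) : Decidable (Spec_build_heuristic_payloads_py findings out) := by unfold Spec_build_heuristic_payloads_py; infer_instance

-- ===== CLAIM (what is proved, stated in full; the proofs are below) =====
def Claim_equal_build_heuristic_payloads_py : Prop := ∀ (findings : List (List (String × String))), Dom_build_heuristic_payloads_py findings → Spec_build_heuristic_payloads_py findings (build_heuristic_payloads_py findings)

-- ===== LEMMAS AND PROOFS =====

-- A's "trigger-set ∩ funcs nonempty" test coincides with B's per-rule scan of the findings
theorem pv_fires_eq (names : List String) (findings : List (List (String × String))) :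
    (!(PySem.Set.inter (PySem.Set.ofList (names.map some)) (pvFuncs findings)).isEmpty)
      = pvRuleFires names findings := by
  rw [Bool.eq_iff_iff]
  simp [pvFuncs, pvRuleFires, PySem.Set.mem_inter, PySem.Set.mem_ofList,
        List.eq_nil_iff_forall_not_mem, List.any_eq_true,
        List.mem_filter, List.mem_map]
  aesop

-- ===== VERDICT (by name: the statement is the Claim_ definition above) =====
theorem build_heuristic_payloads_py_spec : Claim_equal_build_heuristic_payloads_py := by
  intro findings _
  unfold Spec_build_heuristic_payloads_py build_heuristic_payloads_py build_heuristic_payloads_py_alt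
  simp only [pvRules, List.foldl, pv_fires_eq]
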